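-- pv_equiv track=rewrite | github.com/vinmedrado/football-saas | 01_scripts/02_validar_colunas.py | analisar_estruturas
-- ===== SOURCE A (Python) =====
-- def analisar_estruturas(estruturas: dict):
--     todas = list(estruturas.values())
--
--     colunas_unicas = set.union(*todas)
--     colunas_comuns = set.intersection(*todas)
--
--     inconsistencias = {}
--
--     for nome, colunas in estruturas.items():
--         faltando = colunas_unicas - colunas
--         extras = colunas - colunas_comuns
--
--         if faltando or extras:
--             inconsistencias[nome] = {
--                 "faltando": faltando,
--                 "extras": extras
--             }
--
--     return colunas_unicas, colunas_comuns, inconsistencias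
-- ===== SOURCE B (Python) =====
-- def analisar_estruturas(estruturas: dict):
--     n = len(estruturas)
--     freq = {}
--     for colunas in estruturas.values():
--         for c in colunas:
--             freq[c] = freq.get(c, 0) + 1
--     colunas_unicas = set(freq)
--     colunas_comuns = {c for c in freq if freq[c] == n}
--     inconsistencias = {}
--     for nome, colunas in estruturas.items():
--         faltando = {c for c in colunas_unicas if c not in colunas}
--         extras = {c for c in colunas if freq[c] < n}
--         if faltando or extras:
--             inconsistencias[nome] = {"faltando": faltando, "extras": extras}
--     return colunas_unicas, colunas_comuns, inconsistencias
-- ===== Notes on version B (the rewrite author's own statement) =====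
-- stated objective: alternative
-- what changed: Instead of folding pairwise set unions/intersections and set subtractions, B makes one pass building a frequency dict (column -> number of structures containing it) and derives the unique columns as its keys, the common columns as keys with full count, and each structure's extras by a frequency comparison.
-- outside the precondition, e.g. on analisar_estruturas({}): A raises TypeError, B returns (set(), set(), {})
import Mathlib
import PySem

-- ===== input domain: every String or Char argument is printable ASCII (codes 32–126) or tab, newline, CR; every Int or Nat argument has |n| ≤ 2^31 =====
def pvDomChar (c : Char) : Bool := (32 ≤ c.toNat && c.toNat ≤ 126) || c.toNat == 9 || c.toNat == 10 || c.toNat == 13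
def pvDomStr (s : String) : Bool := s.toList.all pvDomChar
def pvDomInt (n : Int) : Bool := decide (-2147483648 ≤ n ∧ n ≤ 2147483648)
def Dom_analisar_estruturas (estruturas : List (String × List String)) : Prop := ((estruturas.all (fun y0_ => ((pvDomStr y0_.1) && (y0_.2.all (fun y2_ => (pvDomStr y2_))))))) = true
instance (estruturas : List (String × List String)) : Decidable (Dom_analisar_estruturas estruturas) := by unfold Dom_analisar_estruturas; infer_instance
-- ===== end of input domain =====

-- B replaces A's pairwise set unions/intersections/differences by a single frequency table
-- (column -> number of structures containing it); the RETURN values are proved equal on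
-- nonempty inputs (A raises TypeError on an empty dict).

-- ===== PORT A =====
def analisar_estruturas (estruturas : List (String × List String)) :
    List String × List String × (List (String × List (String × List String))) :=
  let todas := estruturas.map (·.2)
  match todas with
  | [] => ([], [], [])
  | t0 :: rest =>
    let colunas_unicas : PySem.Set String := rest.foldl (fun acc s => PySem.Set.union acc s) t0
    let colunas_comuns : PySem.Set String := rest.foldl (fun acc s => PySem.Set.inter acc s) t0
    let inconsistencias : PySem.Dict String (List (String × List String)) :=
      estruturas.foldl (fun d p =>
        let faltando := PySem.Set.diff colunas_unicas p.2
        let extras := PySem.Set.diff p.2 colunas_comuns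
        if !faltando.isEmpty || !extras.isEmpty then
          d.insert p.1 [("faltando", faltando), ("extras", extras)]
        else d) PySem.Dict.empty
    (colunas_unicas, colunas_comuns, inconsistencias.items)


-- ===== PORT B =====
def analisar_estruturas_alt (estruturas : List (String × List String)) :
    List String × List String × (List (String × List (String × List String))) :=
  let n : Int := estruturas.length
  let freq : PySem.Dict String Int :=
    estruturas.foldl (fun d p => p.2.foldl (fun d c => d.insert c (d.getD c 0 + 1)) d)
      PySem.Dict.empty
  let colunas_unicas : PySem.Set String := freq.keys
  let colunas_comuns : PySem.Set String := colunas_unicas.filter (fun c => freq.getD c 0 == n)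
  let inconsistencias : List (String × List (String × List String)) :=
    estruturas.foldl (fun acc p =>
      let faltando := colunas_unicas.filter (fun c => !p.2.contains c)
      let extras := p.2.filter (fun c => decide (freq.getD c 0 < n))
      if !faltando.isEmpty || !extras.isEmpty then
        acc ++ [(p.1, [("faltando", faltando), ("extras", extras)])]
      else acc) []
  (colunas_unicas, colunas_comuns, inconsistencias)

-- ===== PRECONDITION & SPEC =====
-- estruturas = [] is excluded because A's set.union(*[]) raises TypeError there; the Nodup
-- conditions are the representation invariant of the type convention (a Python dict cannot
-- carry a duplicate key, a Python set cannot carry a duplicate element) — not a narrowing.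
def Pre_analisar_estruturas (estruturas : List (String × List String)) : Prop :=
  estruturas ≠ [] ∧ (estruturas.map (·.1)).Nodup ∧ ∀ p ∈ estruturas, p.2.Nodup
instance (estruturas : List (String × List String)) : Decidable (Pre_analisar_estruturas estruturas) := by
  unfold Pre_analisar_estruturas; infer_instance

def pvWitness_analisar_estruturas : (List (String × List String)) :=
  [("jogadores", ["id", "nome"]), ("times", ["id", "cidade"])]

def Spec_analisar_estruturas (estruturas : List (String × List String))
    (out : List String × List String × (List (String × List (String × List String)))) : Prop :=
  out = analisar_estruturas_alt estruturas
instance (estruturas : List (String × List String))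
    (out : List String × List String × (List (String × List (String × List String)))) :
    Decidable (Spec_analisar_estruturas estruturas out) := by
  unfold Spec_analisar_estruturas; infer_instance

-- ===== CLAIM (what is proved, stated in full; the proofs are below) =====
def Claim_equal_analisar_estruturas : Prop := ∀ (estruturas : List (String × List String)), Dom_analisar_estruturas estruturas → Pre_analisar_estruturas estruturas → Spec_analisar_estruturas estruturas (analisar_estruturas estruturas)

-- ===== LEMMAS AND PROOFS =====

lemma pv_freq_getD (l : List (String × List String)) (d : PySem.Dict String Int) (c : String) :
    (l.foldl (fun d p => p.2.foldl (fun d c => d.insert c (d.getD c 0 + 1)) d) d).getD c 0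
      = d.getD c 0 + ((l.map (·.2)).flatten.count c : Int) := by
  induction l generalizing d with
  | nil => simp
  | cons p l ih =>
    simp only [List.foldl_cons, List.map_cons, List.flatten_cons, List.count_append]
    rw [ih, PySem.Dict.getD_foldl_insert_add_one]
    push_cast; ring

lemma pv_freq_keys (l : List (String × List String)) (d : PySem.Dict String Int) :
    (l.foldl (fun d p => p.2.foldl (fun d c => d.insert c (d.getD c 0 + 1)) d) d).keys
      = l.foldl (fun s p => PySem.Set.update s p.2) d.keys := by
  induction l generalizing d with
  | nil => rfl
  | cons p l ih =>
    simp only [List.foldl_cons]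
    rw [ih, PySem.Dict.keys_foldl_insert]

lemma pv_update_fold_prefix (l : List (String × List String)) (s : List String) :
    ∃ r, l.foldl (fun s p => PySem.Set.update s p.2) s = s ++ r ∧ ∀ x ∈ r, x ∉ s := by
  induction l generalizing s with
  | nil => exact ⟨[], by simp⟩
  | cons p l ih =>
    obtain ⟨r', hr', hmem⟩ := ih (PySem.Set.update s p.2)
    refine ⟨(PySem.Set.ofList p.2).filter (fun y => !PySem.Set.contains s y) ++ r', ?_, ?_⟩
    · rw [List.foldl_cons, hr', PySem.Set.update_eq_append_filter, List.append_assoc]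
    · intro x hx hxs
      rcases List.mem_append.1 hx with h | h
      · have := (List.mem_filter.1 h).2
        simp [PySem.Set.contains_eq_listContains] at this
        exact this hxs
      · exact hmem x h (by rw [PySem.Set.update_eq_append_filter]; exact List.mem_append_left _ hxs)

lemma pv_inter_fold (l : List (List String)) (s : List String) :
    l.foldl (fun acc t => PySem.Set.inter acc t) s
      = s.filter (fun c => l.all (fun t => t.contains c)) := by
  induction l generalizing s with
  | nil => simp
  | cons t l ih =>
    simp only [List.foldl_cons]
    rw [ih]
    show (s.filter (fun x => t.contains x)).filter _ = _
    rw [List.filter_filter]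
    simp [List.all_cons, Bool.and_comm]

lemma pv_count_flatten (l : List (String × List String)) (c : String)
    (h : ∀ p ∈ l, p.2.Nodup) :
    (l.map (·.2)).flatten.count c = l.countP (fun p => p.2.contains c) := by
  induction l with
  | nil => simp
  | cons p l ih =>
    simp only [List.map_cons, List.flatten_cons, List.count_append, List.countP_cons]
    rw [ih (fun q hq => h q (List.mem_cons_of_mem _ hq))]
    by_cases hc : c ∈ p.2
    · rw [List.count_eq_one_of_mem (h p (List.mem_cons_self)) hc]
      simp [hc]
      omega
    · rw [List.count_eq_zero_of_not_mem hc]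
      simp [hc]

lemma pv_items_cond_insert {β : Type} (l : List (String × β)) (cond : (String × β) → Bool)
    (v : (String × β) → List (String × List String))
    (hnd : (l.map (fun p => p.1)).Nodup) :
    (l.foldl (fun d p => if cond p then d.insert p.1 (v p) else d)
        (PySem.Dict.empty : PySem.Dict String (List (String × List String)))).items
      = l.foldl (fun acc p => if cond p then acc ++ [(p.1, v p)] else acc) [] := by
  rw [← List.foldl_filter, PySem.Dict.items_foldl_insert_fresh (l.filter cond) (fun p => p.1) v _
        (fun a _ => PySem.Dict.contains_empty _)
        (List.Nodup.sublist (List.filter_sublist.map _) hnd),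
      PySem.List.foldl_append_if]
  rfl

theorem pv_main (q : String × List String) (qs : List (String × List String))
    (hkeys : (((q :: qs).map (·.1)).Nodup))
    (hvals : ∀ p ∈ q :: qs, p.2.Nodup) :
    analisar_estruturas (q :: qs) = analisar_estruturas_alt (q :: qs) := by
  have hvq : q.2.Nodup := hvals q List.mem_cons_self
  simp only [analisar_estruturas, analisar_estruturas_alt, List.map_cons]
  set F : PySem.Dict String Int :=
    List.foldl (fun d p => List.foldl (fun d c => d.insert c (d.getD c 0 + 1)) d p.2)
      PySem.Dict.empty (q :: qs) with hF
  set U : List String :=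
    List.foldl (fun acc s => PySem.Set.union acc s) q.2 (List.map (fun x => x.2) qs) with hUdef
  set C : List String :=
    List.foldl (fun acc s => PySem.Set.inter acc s) q.2 (List.map (fun x => x.2) qs) with hCdef
  have hfreq : ∀ c, F.getD c 0 = (((q :: qs).countP (fun p => p.2.contains c) : Int)) := by
    intro c
    rw [hF, pv_freq_getD, pv_count_flatten _ _ hvals]
    simp
  have hUU : U = qs.foldl (fun s p => PySem.Set.update s p.2) q.2 := by
    rw [hUdef, List.foldl_map]
    rfl
  have hkeysU : F.keys = U := by
    have h0 : PySem.Set.update (PySem.Dict.empty : PySem.Dict String Int).keys q.2 = q.2 := by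
      show PySem.Set.ofList q.2 = q.2
      exact PySem.Set.ofList_eq_self_of_nodup _ hvq
    rw [hF, pv_freq_keys, hUU]
    show List.foldl _ (PySem.Set.update PySem.Dict.empty.keys q.2) qs = _
    rw [h0]
  obtain ⟨r, hUr, hrnot⟩ := pv_update_fold_prefix qs q.2
  rw [← hUU] at hUr
  have hfull : ∀ c, (q :: qs).countP (fun p => p.2.contains c) = (q :: qs).length → c ∈ q.2 := by
    intro c hc
    have := List.countP_eq_length.mp hc q List.mem_cons_self
    simpa using this
  have hle : ∀ c, (q :: qs).countP (fun p => p.2.contains c) ≤ (q :: qs).length :=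
    fun c => List.countP_le_length
  have hCeq : C = List.filter (fun c => F.getD c 0 == ((q :: qs).length : Int)) U := by
    rw [hCdef, pv_inter_fold, hUr, List.filter_append]
    have hnil : List.filter (fun c => F.getD c 0 == ((q :: qs).length : Int)) r = [] := by
      apply List.filter_eq_nil_iff.mpr
      intro x hx hbeq
      have hx2 : F.getD x 0 = ((q :: qs).length : Int) := by simpa using hbeq
      rw [hfreq] at hx2
      exact hrnot x hx (hfull x (by exact_mod_cast hx2))
    rw [hnil, List.append_nil]
    apply List.filter_congr
    intro c hc
    rw [Bool.eq_iff_iff, hfreq c, beq_iff_eq, List.all_eq_true]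
    constructor
    · intro h
      have hn : (q :: qs).countP (fun p => p.2.contains c) = (q :: qs).length := by
        apply List.countP_eq_length.mpr
        intro p hp
        rcases List.mem_cons.mp hp with rfl | hp'
        · simpa using hc
        · exact h p.2 (List.mem_map.mpr ⟨p, hp', rfl⟩)
      exact_mod_cast hn
    · intro h
      have hn : (q :: qs).countP (fun p => p.2.contains c) = (q :: qs).length := by
        exact_mod_cast h
      have hall := List.countP_eq_length.mp hn
      intro t ht
      obtain ⟨p, hp, rfl⟩ := List.mem_map.mp ht
      exact hall p (List.mem_cons_of_mem _ hp)
  have hCcont : ∀ x, C.contains x = (F.getD x 0 == ((q :: qs).length : Int)) := by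
    intro x
    rw [Bool.eq_iff_iff, hCeq]
    constructor
    · intro hx
      have hx' : x ∈ List.filter (fun c => F.getD c 0 == ((q :: qs).length : Int)) U := by
        simpa using hx
      exact (List.mem_filter.mp hx').2
    · intro hx
      have hxeq : F.getD x 0 = ((q :: qs).length : Int) := by simpa using hx
      rw [hfreq] at hxeq
      have hxn : (q :: qs).countP (fun p => p.2.contains x) = (q :: qs).length := by
        exact_mod_cast hxeq
      have hxq := hfull x hxn
      have hmem : x ∈ List.filter (fun c => F.getD c 0 == ((q :: qs).length : Int)) U :=
        List.mem_filter.mpr ⟨by rw [hUr]; exact List.mem_append_left _ hxq, hx⟩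
      simpa using hmem
  have hext : ∀ (p : String × List String),
      PySem.Set.diff p.2 C
        = List.filter (fun c => decide (F.getD c 0 < ((q :: qs).length : Int))) p.2 := by
    intro p
    show List.filter (fun x => !PySem.Set.contains C x) p.2 = _
    apply List.filter_congr
    intro c _
    have h1 := hle c
    rw [show PySem.Set.contains C c = C.contains c from rfl, hCcont c, Bool.eq_iff_iff, hfreq c]
    simp only [Bool.not_eq_eq_eq_not, Bool.not_true, beq_eq_false_iff_ne, ne_eq,
      decide_eq_true_eq]
    constructor
    · intro h
      have h2 : (q :: qs).countP (fun p => p.2.contains c) ≠ (q :: qs).length := by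
        exact_mod_cast h
      omega
    · intro h
      have h2 : (q :: qs).countP (fun p => p.2.contains c) < (q :: qs).length := by
        exact_mod_cast h
      omega
  have hfal : ∀ (p : String × List String),
      PySem.Set.diff U p.2 = List.filter (fun c => !p.2.contains c) U :=
    fun p => rfl
  rw [hkeysU]
  simp only [Prod.mk.injEq]
  refine ⟨trivial, hCeq, ?_⟩
  simp only [hfal, hext]
  exact pv_items_cond_insert _ _ _ hkeys

-- ===== VERDICT =====
theorem analisar_estruturas_spec : Claim_equal_analisar_estruturas := by
  intro es _ hpre
  obtain ⟨hne, hkeys, hvals⟩ := hpre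
  unfold Spec_analisar_estruturas
  cases es with
  | nil => exact absurd rfl hne
  | cons q qs => exact pv_main q qs hkeys hvals
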